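-- pv_equiv track=rewrite | github.com/Albantakis/actual_agency | actual_agency.py | num2state
-- ===== SOURCE A (Python) =====
-- def num2state(num,n_nodes,convention='loli'):
--     '''
--     Function description
--         Inputs:
--             inputs:
--         Outputs:
--             outputs:
--     '''
--
--     number = '{0:0' + str(n_nodes) + 'b}'
--     state = number.format(num)
--     state = [int(i) for i in state]
--
--     # returns the state
--     if convention == 'loli':
--         state.reverse()
--         return state
--     else:
--         return state
-- ===== SOURCE B (Python) =====
-- def num2state(num, n_nodes, convention='loli'):
--     if num < 0 or n_nodes < 0:
--         raise ValueError("num and n_nodes must be non-negative")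
--     # Extract bits arithmetically, least-significant first.
--     bits = []
--     while num:
--         bits.append(num & 1)
--         num >>= 1
--     if not bits:          # binary representation of 0 is a single '0'
--         bits = [0]
--     bits += [0] * (n_nodes - len(bits))
--     return bits if convention == 'loli' else bits[::-1]
-- ===== Notes on version B (the rewrite author's own statement) =====
-- stated objective: faster
-- what changed: B extracts the bits by arithmetic (num & 1, num >>= 1) into a least-significant-first list and pads with zeros, avoiding A's str.format binary-string construction and per-character int() parsing (constant-factor win).
import Mathlib
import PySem

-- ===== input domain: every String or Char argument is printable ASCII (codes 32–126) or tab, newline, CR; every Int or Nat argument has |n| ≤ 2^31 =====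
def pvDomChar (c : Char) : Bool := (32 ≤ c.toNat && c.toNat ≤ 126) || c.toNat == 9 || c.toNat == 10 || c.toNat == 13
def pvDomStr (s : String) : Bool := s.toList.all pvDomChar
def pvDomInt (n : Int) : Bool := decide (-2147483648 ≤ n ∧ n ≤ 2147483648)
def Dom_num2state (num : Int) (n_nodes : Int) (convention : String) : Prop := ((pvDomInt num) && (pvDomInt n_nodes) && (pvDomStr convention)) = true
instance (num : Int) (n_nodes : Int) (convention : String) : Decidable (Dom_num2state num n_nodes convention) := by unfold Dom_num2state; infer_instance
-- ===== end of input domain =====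

-- B replaces A's '{0:0Nb}'.format / int-per-character pipeline by arithmetic bit
-- extraction (LSB first) plus zero padding; both raise ValueError on negative inputs.

-- ===== PORT A =====
-- '{0:b}'.format(num) for num ≥ 0: the binary digit characters, most significant first
-- (exactly '0' for num = 0). Exact on Pre_ (num ≥ 0).
def binChars : Nat → List Char
  | 0 => ['0']
  | 1 => ['1']
  | n+2 => binChars ((n+2)/2) ++ [if (n+2) % 2 = 1 then '1' else '0']
decreasing_by omega

def num2state (num : Int) (n_nodes : Int) (convention : String) : List Int :=
  -- state = number.format(num): left-pad with '0' to width n_nodes (Pre_: n_nodes ≥ 0)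
  let s := List.replicate (n_nodes.toNat - (binChars num.toNat).length) '0' ++ binChars num.toNat
  -- [int(i) for i in state]; each character is '0' or '1' for num ≥ 0
  let state := s.map (fun c => if c = '1' then (1:Int) else 0)
  if convention == "loli" then state.reverse else state

-- ===== PORT B =====
-- the 'while num: bits.append(num & 1); num >>= 1' loop, run on num.toNat
-- (identical to the Python loop for num ≥ 0; B's explicit guard raises outside Pre_)
def altBits : Nat → List Int
  | 0 => []
  | n+1 => (((n+1) % 2 : Nat) : Int) :: altBits ((n+1)/2)
decreasing_by omega

def num2state_alt (num : Int) (n_nodes : Int) (convention : String) : List Int :=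
  let bits := altBits num.toNat
  let bits := if bits = [] then [0] else bits           -- if not bits: bits = [0]
  let bits := bits ++ List.replicate (n_nodes - bits.length).toNat 0
  if convention == "loli" then bits else bits.reverse

-- ===== PRECONDITION & SPEC =====
-- A raises ValueError when num < 0 (int('-')) or n_nodes < 0 (invalid format spec),
-- and B raises ValueError on the same inputs; Pre_ excludes exactly those.
def Pre_num2state (num : Int) (n_nodes : Int) (convention : String) : Prop :=
  0 ≤ num ∧ 0 ≤ n_nodes
instance (num : Int) (n_nodes : Int) (convention : String) : Decidable (Pre_num2state num n_nodes convention) := by unfold Pre_num2state; infer_instance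
def pvWitness_num2state : Int × Int × String := (5, 3, "loli")

def Spec_num2state (num : Int) (n_nodes : Int) (convention : String) (out : List Int) : Prop := out = num2state_alt num n_nodes convention
instance (num : Int) (n_nodes : Int) (convention : String) (out : List Int) : Decidable (Spec_num2state num n_nodes convention out) := by unfold Spec_num2state; infer_instance

-- ===== CLAIM (what is proved, stated in full; the proofs are below) =====
def Claim_equal_num2state : Prop := ∀ (num : Int) (n_nodes : Int) (convention : String), Dom_num2state num n_nodes convention → Pre_num2state num n_nodes convention → Spec_num2state num n_nodes convention (num2state num n_nodes convention)

-- ===== LEMMAS AND PROOFS =====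

-- B's bit list with the 0 ↦ [0] fix-up
def bitsFix (n : Nat) : List Int := if altBits n = [] then [0] else altBits n

lemma altBits_ne_nil {n : Nat} (h : n ≠ 0) : altBits n ≠ [] := by
  cases n with
  | zero => exact absurd rfl h
  | succ m => rw [altBits]; simp

-- A's digit characters, mapped to ints, are B's bits reversed
lemma binChars_map (n : Nat) :
    (binChars n).map (fun c => if c = '1' then (1:Int) else 0) = (bitsFix n).reverse := by
  induction n using Nat.strong_induction_on with
  | _ n ih =>
    match n with
    | 0 => simp [binChars, altBits, bitsFix]
    | 1 => simp [binChars, altBits, bitsFix]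
    | n+2 =>
      rw [binChars, bitsFix, altBits]
      have hne : altBits ((n+2)/2) ≠ [] := altBits_ne_nil (by omega)
      have ih' := ih ((n+2)/2) (by omega)
      rw [bitsFix, if_neg hne] at ih'
      simp only [List.map_append, ih', List.map_cons, if_neg (by simp : ¬ ((((n+2) % 2 : Nat) : Int) :: altBits ((n+2)/2) = []))]
      simp only [List.reverse_cons]
      congr 1
      rcases Nat.mod_two_eq_zero_or_one (n+2) with h | h <;> simp [h]

lemma bitsFix_length (n : Nat) : (bitsFix n).length = (binChars n).length := by
  have := congrArg List.length (binChars_map n)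
  simpa using this.symm

-- ===== VERDICT (by name: the statement is the Claim_ definition above) =====
theorem num2state_spec : Claim_equal_num2state := by
  intro num n_nodes convention _ hpre
  obtain ⟨hnum, hn⟩ := hpre
  unfold Spec_num2state num2state num2state_alt
  have hfix : (if altBits num.toNat = [] then [0] else altBits num.toNat) = bitsFix num.toNat := rfl
  have hlen : (n_nodes - ((bitsFix num.toNat).length : Int)).toNat
      = n_nodes.toNat - (binChars num.toNat).length := by
    rw [bitsFix_length]; omega
  by_cases hc : convention == "loli" <;>
    simp only [hc, hfix, hlen, if_true, if_false, List.map_append, List.map_replicate,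
      binChars_map num.toNat, List.reverse_append, List.reverse_reverse,
      List.reverse_replicate, Bool.false_eq_true] <;>
    rw [show (if ('0':Char) = '1' then (1:Int) else 0) = 0 from by decide]
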